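-- pv_equiv track=rewrite | github.com/ryandavis3/leetcode | frequency_most_frequent_element.py | get_max_frequency_from_matrix
-- ===== SOURCE A (Python) =====
-- from typing import Dict, List
--
-- def get_cumulative_increments(increments: List[int]) -> List[int]:
--     L = len(increments)
--     cumulative_increments = [0] * L
--     cumsum = 0
--     for i, increment in enumerate(increments):
--         cumsum += increment
--         cumulative_increments[i] = cumsum
--     return cumulative_increments
--
-- def get_max_freq_cumulative_increments(cumulative_increments: List[int], k: int) -> int:
--     if not cumulative_increments:
--         return 1
--     if cumulative_increments[-1] <= k:
--         return len(cumulative_increments) + 1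
--     for i, cumulative_increment in enumerate(cumulative_increments):
--         if cumulative_increment > k:
--             return i + 1
--
-- def get_max_frequency_from_matrix(increment_matrix: List[List[int]], k: int) -> List[int]:
--     L = len(increment_matrix)
--     max_freq = 0
--     for i in range(L):
--         increments = increment_matrix[i][::-1]
--         increments = [x for x in increments if x > 0]
--         cumulative_increments = get_cumulative_increments(increments=increments)
--         max_freq_i = get_max_freq_cumulative_increments(cumulative_increments=cumulative_increments, k=k)
--         if max_freq_i > max_freq:
--             max_freq = max_freq_i
--     return max_freq
-- ===== SOURCE B (Python) =====
-- def get_max_frequency_from_matrix(increment_matrix, k):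
--     # Single pass per row: walk the row in reverse with a running sum and a
--     # count of positive entries, breaking as soon as the sum exceeds k.
--     max_freq = 0
--     for row in increment_matrix:
--         s = 0
--         count = 0
--         freq = None
--         for x in reversed(row):
--             if x <= 0:
--                 continue
--             s += x
--             count += 1
--             if s > k:
--                 freq = count
--                 break
--         if freq is None:
--             freq = count + 1
--         max_freq = max(max_freq, freq)
--     return max_freq
-- ===== Notes on version B (the rewrite author's own statement) =====
-- stated objective: simpler
-- what changed: Replaced the three-helper pipeline (reverse-slice copy, filter copy, cumulative-sum array, then a second scan of that array) by one inline reverse scan per row with a running sum and count that breaks at the first prefix sum exceeding k.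
import Mathlib
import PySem

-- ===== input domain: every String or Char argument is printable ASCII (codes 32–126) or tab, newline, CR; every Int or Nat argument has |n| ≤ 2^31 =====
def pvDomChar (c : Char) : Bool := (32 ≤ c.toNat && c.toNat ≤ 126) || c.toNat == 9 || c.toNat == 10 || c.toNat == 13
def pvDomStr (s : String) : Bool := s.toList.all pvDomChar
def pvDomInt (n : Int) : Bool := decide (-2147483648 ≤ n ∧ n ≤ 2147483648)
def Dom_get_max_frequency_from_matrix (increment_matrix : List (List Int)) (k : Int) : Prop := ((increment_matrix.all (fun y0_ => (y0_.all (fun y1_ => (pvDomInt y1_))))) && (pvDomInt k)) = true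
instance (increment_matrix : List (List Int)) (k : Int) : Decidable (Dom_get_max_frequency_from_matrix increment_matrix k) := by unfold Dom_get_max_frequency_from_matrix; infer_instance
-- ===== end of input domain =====

-- B replaces A's three-helper pipeline (reverse slice, filter, cumulative-sum array, second scan)
-- by one inline early-exiting reverse scan per row with a running sum and count (objective: simpler).

-- ===== PORT A =====
-- 'cumsum' accumulator of the enumerate loop in get_cumulative_increments
def get_cumulative_increments_go (cumsum : Int) : List Int → List Int
  | [] => []
  | x :: rest => (cumsum + x) :: get_cumulative_increments_go (cumsum + x) rest

def get_cumulative_increments (increments : List Int) : List Int :=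
  get_cumulative_increments_go 0 increments

-- the 'for i, cumulative_increment in enumerate(...)' loop; on fall-through Python returns
-- None — unreachable from A's call site (the branch above guarantees a hit); 0 stands for it
def get_max_freq_loop (k : Int) (i : Int) : List Int → Int
  | [] => 0
  | c :: rest => if c > k then i + 1 else get_max_freq_loop k (i + 1) rest

def get_max_freq_cumulative_increments (cumulative_increments : List Int) (k : Int) : Int :=
  if cumulative_increments = [] then 1
  else if PySem.List.pyGetD cumulative_increments (-1) 0 ≤ k then cumulative_increments.length + 1
  else get_max_freq_loop k 0 cumulative_increments

-- body of the 'for i in range(L)' loop, with row = increment_matrix[i]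
def a_row_body (k : Int) (max_freq : Int) (row : List Int) : Int :=
  let increments := (PySem.List.slice? row none none (-1)).getD []   -- row[::-1]
  let increments := increments.filter (fun x => decide (x > 0))
  let cumulative_increments := get_cumulative_increments increments
  let max_freq_i := get_max_freq_cumulative_increments cumulative_increments k
  if max_freq_i > max_freq then max_freq_i else max_freq

def get_max_frequency_from_matrix (increment_matrix : List (List Int)) (k : Int) : Int :=
  (PySem.List.pyRange 0 (increment_matrix.length : Int) 1).foldl
    (fun max_freq i => a_row_body k max_freq (PySem.List.pyGetD increment_matrix i [])) 0

-- ===== PORT B =====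
-- the inner 'for x in reversed(row)' loop: running sum s, count of positives; break → count
def rowFreq_go (k : Int) : List Int → Int → Int → Int
  | [], _, count => count + 1
  | x :: rest, s, count =>
    if x ≤ 0 then rowFreq_go k rest s count
    else if s + x > k then count + 1
    else rowFreq_go k rest (s + x) (count + 1)

def get_max_frequency_from_matrix_alt (increment_matrix : List (List Int)) (k : Int) : Int :=
  increment_matrix.foldl (fun max_freq row => max max_freq (rowFreq_go k row.reverse 0 0)) 0

-- ===== PRECONDITION & SPEC =====
def Spec_get_max_frequency_from_matrix (increment_matrix : List (List Int)) (k : Int) (out : Int) : Prop := out = get_max_frequency_from_matrix_alt increment_matrix k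
instance (increment_matrix : List (List Int)) (k : Int) (out : Int) : Decidable (Spec_get_max_frequency_from_matrix increment_matrix k out) := by unfold Spec_get_max_frequency_from_matrix; infer_instance

-- ===== CLAIM (what is proved, stated in full; the proofs are below) =====
def Claim_equal_get_max_frequency_from_matrix : Prop := ∀ (increment_matrix : List (List Int)) (k : Int), Dom_get_max_frequency_from_matrix increment_matrix k → Spec_get_max_frequency_from_matrix increment_matrix k (get_max_frequency_from_matrix increment_matrix k)

-- ===== LEMMAS AND PROOFS =====

-- count parameter shifts out of rowFreq_go
theorem rowFreq_go_count (k : Int) (l : List Int) : ∀ s c, rowFreq_go k l s c = rowFreq_go k l s 0 + c := by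
  induction l with
  | nil => intro s c; simp only [rowFreq_go]; omega
  | cons x rest ih =>
    intro s c
    simp only [rowFreq_go]
    split_ifs with h1 h2
    · exact ih s c
    · omega
    · rw [ih (s + x) (c + 1), ih (s + x) (0 + 1)]; omega

-- B's skip of nonpositive entries is A's filter
theorem rowFreq_go_filter (k : Int) (l : List Int) : ∀ s c,
    rowFreq_go k l s c = rowFreq_go k (l.filter (fun x => decide (x > 0))) s c := by
  induction l with
  | nil => intro s c; rfl
  | cons x rest ih =>
    intro s c
    by_cases hx : x ≤ 0
    · have hd : decide (x > 0) = false := by simp; omega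
      simp only [List.filter_cons, hd, Bool.false_eq_true, rowFreq_go, if_pos hx]
      exact ih s c
    · have hd : decide (x > 0) = true := by simp; omega
      simp only [List.filter_cons, hd, if_pos, rowFreq_go, if_neg hx]
      split_ifs with h
      · rfl
      · exact ih (s + x) (c + 1)

theorem cumgo_length (l : List Int) : ∀ s, (get_cumulative_increments_go s l).length = l.length := by
  induction l with
  | nil => intro s; rfl
  | cons x rest ih => intro s; simp [get_cumulative_increments_go, ih]

theorem cumgo_getLast? (l : List Int) : ∀ s, l ≠ [] →
    (get_cumulative_increments_go s l).getLast? = some (s + l.sum) := by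
  induction l with
  | nil => intro s h; exact absurd rfl h
  | cons x rest ih =>
    intro s _
    rcases rest with _ | ⟨y, t⟩
    · simp [get_cumulative_increments_go]
    · have h := ih (s + x) (by simp)
      simp only [get_cumulative_increments_go] at h ⊢
      rw [List.getLast?_cons_cons, h]
      simp only [List.sum_cons, Option.some_inj]
      ring

-- if the whole remaining sum stays ≤ k, B's scan runs to the end
theorem rowFreq_go_all_le (k : Int) (l : List Int) : ∀ s, (∀ x ∈ l, 0 < x) → s + l.sum ≤ k →
    rowFreq_go k l s 0 = l.length + 1 := by
  induction l with
  | nil => intro s _ _; rfl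
  | cons x rest ih =>
    intro s hpos hle
    have hx : 0 < x := hpos x (List.mem_cons_self ..)
    have hrest : ∀ y ∈ rest, 0 < y := fun y hy => hpos y (List.mem_cons_of_mem _ hy)
    have hsum : 0 ≤ rest.sum := List.sum_nonneg (fun y hy => le_of_lt (hrest y hy))
    simp only [List.sum_cons] at hle
    have h1 : ¬ x ≤ 0 := by omega
    have h2 : ¬ s + x > k := by omega
    simp only [rowFreq_go, if_neg h1, if_neg h2]
    rw [rowFreq_go_count k rest (s + x) (0 + 1), ih (s + x) hrest (by omega)]
    simp only [List.length_cons]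
    push_cast
    omega

-- if the remaining sum exceeds k, A's index scan of the cumulative sums is B's scan
theorem loop_eq_rowFreq (k : Int) (l : List Int) : ∀ s i, l ≠ [] → (∀ x ∈ l, 0 < x) →
    k < s + l.sum → get_max_freq_loop k i (get_cumulative_increments_go s l) = rowFreq_go k l s 0 + i := by
  induction l with
  | nil => intro s i h; exact absurd rfl h
  | cons x rest ih =>
    intro s i _ hpos hgt
    have hx : 0 < x := hpos x (List.mem_cons_self ..)
    have hrest : ∀ y ∈ rest, 0 < y := fun y hy => hpos y (List.mem_cons_of_mem _ hy)
    simp only [List.sum_cons] at hgt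
    have hxle : ¬ x ≤ 0 := by omega
    simp only [get_cumulative_increments_go, get_max_freq_loop, rowFreq_go, if_neg hxle]
    by_cases hbreak : s + x > k
    · rw [if_pos hbreak, if_pos hbreak]; omega
    · have hrne : rest ≠ [] := by
        intro h; subst h; simp at hgt; omega
      rw [if_neg hbreak, if_neg hbreak, ih (s + x) (i + 1) hrne hrest (by omega),
          rowFreq_go_count k rest (s + x) (0 + 1)]
      omega

-- per filtered row: A's cumulative-sum procedure equals B's scan
theorem gmfci_eq_rowFreq (k : Int) (l : List Int) (hpos : ∀ x ∈ l, 0 < x) :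
    get_max_freq_cumulative_increments (get_cumulative_increments l) k = rowFreq_go k l 0 0 := by
  rcases l with _ | ⟨x, rest⟩
  · rfl
  · simp only [get_cumulative_increments]
    have hne : get_cumulative_increments_go 0 (x :: rest) ≠ [] := by
      simp [get_cumulative_increments_go]
    have h0 := cumgo_getLast? (x :: rest) 0 (by simp)
    rw [List.getLast?_eq_some_getLast hne] at h0
    have hlast : PySem.List.pyGetD (get_cumulative_increments_go 0 (x :: rest)) (-1) 0
        = 0 + (x :: rest).sum := by
      rw [PySem.List.pyGetD_neg_one _ _ hne]
      exact Option.some_inj.mp h0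
    rw [get_max_freq_cumulative_increments, if_neg hne, hlast]
    by_cases hle : 0 + (x :: rest).sum ≤ k
    · rw [if_pos hle, rowFreq_go_all_le k (x :: rest) 0 hpos (by omega)]
      simp [cumgo_length]
    · rw [if_neg hle, loop_eq_rowFreq k (x :: rest) 0 0 (by simp) hpos (by omega)]
      omega

-- ===== VERDICT (by name: the statement is the Claim_ definition above) =====
theorem get_max_frequency_from_matrix_spec : Claim_equal_get_max_frequency_from_matrix := by
  intro m k _
  unfold Spec_get_max_frequency_from_matrix get_max_frequency_from_matrix get_max_frequency_from_matrix_alt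
  rw [PySem.List.foldl_pyRange_zero_pyGetD' m [] (a_row_body k) 0]
  apply PySem.List.foldl_congr_mem
  intro acc row _
  unfold a_row_body
  rw [PySem.List.slice?_none_none_neg_one]
  simp only [Option.getD_some]
  rw [gmfci_eq_rowFreq k _ (by intro x hx; simpa using (List.mem_filter.mp hx).2),
      ← rowFreq_go_filter]
  omega
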